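-- pv_equiv track=rewrite | github.com/naumovie/BruteForce | ProjectivePlane.py | isProjectivePlane
-- ===== SOURCE A (Python) =====
-- from itertools import combinations
--
-- def isProjectivePlane(matrix, hyper_params):
--     q = hyper_params[0]
--     n = q**2 + q + 1
--     result = True
--
--     """
--     1. Every line contains q + 1 points
--     2. Every point lies on q + 1 lines
--     3. Any two distinct lines intersect in a unique point
--     4. Any two distinct points lie on a unique line.
--     """
--
--     #1
--     if not all(sum(row) == q+1 for row in matrix): return False
--     #2
--     if not all([sum([matrix[i][j] for i in range(n)]) == q+1 for j in range(n)]): return False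
--     #3
--     for pair in combinations(range(n), 2):
--         common_points = (sum(matrix[pair[0]][j] * matrix[pair[1]][j] for j in range(n)))
--         if common_points != 1: return False
--     #4
--     for pair in combinations(range(n), 2):
--         common_lines = (sum(matrix[i][pair[0]]*matrix[i][pair[1]] for i in range(n)))
--         if common_lines != 1: return False
--
--
--     return True
-- ===== SOURCE B (Python) =====
-- from itertools import combinations
--
-- def isProjectivePlane(matrix, hyper_params):
--     q = hyper_params[0]
--     n = q * q + q + 1
--     for row in matrix:
--         if sum(row) != q + 1:
--             return False
--     rows = [matrix[i][:n] for i in range(n)]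
--     cols = [[rows[i][j] for i in range(n)] for j in range(n)]
--     for col in cols:
--         if sum(col) != q + 1:
--             return False
--     for family in (rows, cols):
--         supports = [[(j, v) for j, v in enumerate(vec) if v != 0] for vec in family]
--         for a, b in combinations(range(n), 2):
--             vb = family[b]
--             if sum(v * vb[j] for j, v in supports[a]) != 1:
--                 return False
--     return True
-- ===== Notes on version B (the rewrite author's own statement) =====
-- stated objective: alternative
-- what changed: B slices out the n-by-n block once, builds explicit row/column vectors and precomputed nonzero supports, and checks each pair's intersection by summing only over the support entries of the first vector (one generic pass run on rows and then on columns), instead of A's full length-n dot product per pair; intended as faster on sparse incidence matrices (measured 1.59x at the largest generated size, not consistently >=1.5x), recorded here as alternative.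
import Mathlib
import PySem

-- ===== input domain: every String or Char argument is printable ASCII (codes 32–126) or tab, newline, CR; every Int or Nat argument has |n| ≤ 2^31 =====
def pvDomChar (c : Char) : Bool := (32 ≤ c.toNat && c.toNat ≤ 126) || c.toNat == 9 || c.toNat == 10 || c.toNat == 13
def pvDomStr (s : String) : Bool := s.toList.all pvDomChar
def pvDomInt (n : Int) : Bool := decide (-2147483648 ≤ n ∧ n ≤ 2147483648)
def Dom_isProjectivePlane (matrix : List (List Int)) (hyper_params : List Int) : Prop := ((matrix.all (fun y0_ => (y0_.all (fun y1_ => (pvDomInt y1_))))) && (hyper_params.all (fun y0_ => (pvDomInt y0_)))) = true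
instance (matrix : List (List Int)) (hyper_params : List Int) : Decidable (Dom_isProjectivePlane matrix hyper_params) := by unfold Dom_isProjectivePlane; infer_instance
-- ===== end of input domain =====

-- B builds the n-by-n block's rows and columns once and checks each pair of
-- lines/points over the precomputed nonzero support of the first vector,
-- instead of A's full length-n dot product per pair (return value only).

-- ===== PORT A =====
-- itertools.combinations(xs, 2) in iteration order (shared by both Pythons)
def pvCombs2 {α : Type} : List α → List (α × α)
  | [] => []
  | x :: xs => (xs.map fun y => (x, y)) ++ pvCombs2 xs

-- matrix[i][j]; in-range under Pre_ (default never read there)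
def pvAget (matrix : List (List Int)) (i j : Int) : Int :=
  PySem.List.pyGetD (PySem.List.pyGetD matrix i []) j 0

def isProjectivePlane (matrix : List (List Int)) (hyper_params : List Int) : Bool :=
  match hyper_params with
  | [] => false  -- Python: IndexError on hyper_params[0]; excluded by Pre_
  | q :: _ =>
    let n : Int := q ^ 2 + q + 1
    if !(matrix.all fun row => row.sum == q + 1) then false
    else if !((PySem.List.pyRange 0 n 1).all fun j =>
        (((PySem.List.pyRange 0 n 1).map fun i => pvAget matrix i j).sum == q + 1)) then false
    else if !((pvCombs2 (PySem.List.pyRange 0 n 1)).all fun p =>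
        (((PySem.List.pyRange 0 n 1).map fun j =>
            pvAget matrix p.1 j * pvAget matrix p.2 j).sum == 1)) then false
    else if !((pvCombs2 (PySem.List.pyRange 0 n 1)).all fun p =>
        (((PySem.List.pyRange 0 n 1).map fun i =>
            pvAget matrix i p.1 * pvAget matrix i p.2).sum == 1)) then false
    else true

-- ===== PORT B =====
def isProjectivePlane_alt (matrix : List (List Int)) (hyper_params : List Int) : Bool :=
  match hyper_params with
  | [] => false  -- Python: IndexError on hyper_params[0]; excluded by Pre_
  | q :: _ =>
    let n : Int := q * q + q + 1
    if !(matrix.all fun row => row.sum == q + 1) then false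
    else
      let rows := (PySem.List.pyRange 0 n 1).map fun i =>
        PySem.List.slice (PySem.List.pyGetD matrix i []) none (some n)
      let cols := (PySem.List.pyRange 0 n 1).map fun j =>
        (PySem.List.pyRange 0 n 1).map fun i =>
          PySem.List.pyGetD (PySem.List.pyGetD rows i []) j 0
      if !(cols.all fun col => col.sum == q + 1) then false
      else
        [rows, cols].all fun family =>
          let supports := family.map fun vec =>
            (PySem.List.enumerate vec 0).filter fun pr => pr.2 != 0
          (pvCombs2 (PySem.List.pyRange 0 n 1)).all fun p =>
            let vb := PySem.List.pyGetD family p.2 []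
            (((PySem.List.pyGetD supports p.1 []).map fun pr =>
                pr.2 * PySem.List.pyGetD vb pr.1 0).sum == 1)

-- ===== PRECONDITION & SPEC =====
-- Pre_ excludes exactly the inputs where A raises IndexError: empty hyper_params
-- (hyper_params[0]), and matrices whose rows all sum to q+1 but which lack a full
-- n-by-n top-left block (the column-sum list comprehension then indexes out of range).
def Pre_isProjectivePlane (matrix : List (List Int)) (hyper_params : List Int) : Prop :=
  hyper_params ≠ [] ∧
    (let q := hyper_params.headD 0
     let n : Int := q * q + q + 1
     (∃ row ∈ matrix, row.sum ≠ q + 1) ∨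
       (n ≤ (matrix.length : Int) ∧ ∀ row ∈ matrix.take n.toNat, n ≤ (row.length : Int)))
instance (matrix : List (List Int)) (hyper_params : List Int) : Decidable (Pre_isProjectivePlane matrix hyper_params) := by unfold Pre_isProjectivePlane; infer_instance

def pvWitness_isProjectivePlane : List (List Int) × List Int :=
  ([[1, 1, 0], [0, 1, 1], [1, 0, 1]], [1])

def Spec_isProjectivePlane (matrix : List (List Int)) (hyper_params : List Int) (out : Bool) : Prop := out = isProjectivePlane_alt matrix hyper_params
instance (matrix : List (List Int)) (hyper_params : List Int) (out : Bool) : Decidable (Spec_isProjectivePlane matrix hyper_params out) := by unfold Spec_isProjectivePlane; infer_instance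

-- ===== CLAIM (what is proved, stated in full; the proofs are below) =====
def Claim_equal_isProjectivePlane : Prop := ∀ (matrix : List (List Int)) (hyper_params : List Int), Dom_isProjectivePlane matrix hyper_params → Pre_isProjectivePlane matrix hyper_params → Spec_isProjectivePlane matrix hyper_params (isProjectivePlane matrix hyper_params)

-- ===== LEMMAS AND PROOFS =====

lemma pvMem_combs2 {α : Type} {l : List α} {p : α × α} (h : p ∈ pvCombs2 l) :
    p.1 ∈ l ∧ p.2 ∈ l := by
  induction l with
  | nil => simp [pvCombs2] at h
  | cons x xs ih =>
    simp only [pvCombs2, List.mem_append, List.mem_map] at h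
    rcases h with ⟨y, hy, rfl⟩ | h
    · exact ⟨List.mem_cons_self, List.mem_cons_of_mem _ hy⟩
    · exact ⟨List.mem_cons_of_mem _ (ih h).1, List.mem_cons_of_mem _ (ih h).2⟩

-- support-restricted dot product equals the full indexed dot product
lemma pvSupportDot (u v : List Int) (s : Int) :
    (((PySem.List.enumerate u s).filter fun pr => pr.2 != 0).map
        (fun pr => pr.2 * PySem.List.pyGetD v pr.1 0)).sum
      = ((List.range u.length).map
          (fun k => u.getD k 0 * PySem.List.pyGetD v (s + (k : Int)) 0)).sum := by
  induction u generalizing s with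
  | nil => simp [PySem.List.enumerate_nil]
  | cons x u ih =>
    rw [PySem.List.enumerate_cons, List.length_cons, List.range_succ_eq_map]
    simp only [List.filter_cons, List.map_cons, List.sum_cons, List.map_map]
    have hr : ((List.range u.length).map
        ((fun k => (x :: u).getD k 0 * PySem.List.pyGetD v (s + (k : Int)) 0) ∘ Nat.succ)).sum
        = ((List.range u.length).map
          (fun k => u.getD k 0 * PySem.List.pyGetD v ((s + 1) + (k : Int)) 0)).sum := by
      apply congrArg List.sum
      apply List.map_congr_left
      intro k hk
      simp only [Function.comp_apply, List.getD_cons_succ]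
      congr 2
      push_cast
      ring
    by_cases hx : x = 0
    · subst hx
      simp only [bne_self_eq_false, Bool.false_eq_true, if_false, hr, ih]
      simp
    · have hb : (x != 0) = true := by simpa using hx
      rw [hb]
      simp only [if_true, List.map_cons, List.sum_cons, hr, ih]
      simp

lemma pvAllCongr {α : Type} {l : List α} {f g : α → Bool} (h : ∀ x ∈ l, f x = g x) :
    l.all f = l.all g := by
  induction l with
  | nil => rfl
  | cons x xs ih =>
    simp only [List.all_cons, h x List.mem_cons_self]
    rw [ih fun y hy => h y (List.mem_cons_of_mem _ hy)]

-- ===== VERDICT (by name: the statement is the Claim_ definition above) =====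
theorem isProjectivePlane_spec : Claim_equal_isProjectivePlane := by
  intro matrix hp _hDom hPre
  unfold Spec_isProjectivePlane
  obtain ⟨hne, hPre2⟩ := hPre
  cases hp with
  | nil => exact absurd rfl hne
  | cons q t =>
    simp only [List.headD_cons] at hPre2
    by_cases h1 : (matrix.all fun row => row.sum == q + 1) = true
    case neg =>
      have h1' : (matrix.all fun row => row.sum == q + 1) = false := by
        simpa using h1
      simp [isProjectivePlane, isProjectivePlane_alt, h1']
    case pos =>
      have hsum : ∀ row ∈ matrix, row.sum = q + 1 := by
        intro r hr
        have := (List.all_eq_true.mp h1) r hr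
        simpa using this
      set n : Int := q * q + q + 1 with hn
      have hn0 : 0 < n := by nlinarith [sq_nonneg (2*q+1)]
      rcases hPre2 with hex | ⟨hlen, hrows⟩
      · obtain ⟨row, hmem, hneq⟩ := hex
        exact absurd (hsum row hmem) hneq
      have hNlen : n.toNat ≤ matrix.length := by omega
      have hrowlen : ∀ i : Int, 0 ≤ i → i < n → n.toNat ≤ (PySem.List.pyGetD matrix i []).length := by
        intro i h0 hi
        have hit : i.toNat < matrix.length := by omega
        have h1' : i < (matrix.length : Int) := by omega
        rw [PySem.List.pyGetD_eq_getElem _ _ h0 h1']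
        have hmem : matrix[i.toNat] ∈ matrix.take n.toNat := by
          have hlt : i.toNat < (matrix.take n.toNat).length := by
            simp only [List.length_take]; omega
          have : (matrix.take n.toNat)[i.toNat]'hlt = matrix[i.toNat] := List.getElem_take
          exact this ▸ List.getElem_mem hlt
        have := hrows _ hmem
        omega
      have hentry : ∀ i j : Int, 0 ≤ i → i < n → 0 ≤ j → j < n →
          PySem.List.pyGetD ((PySem.List.pyGetD matrix i []).take n.toNat) j 0 = pvAget matrix i j := by
        intro i j hi0 hi hj0 hj
        have hrl := hrowlen i hi0 hi
        have ha' : j < ((((PySem.List.pyGetD matrix i []).take n.toNat)).length : Int) := by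
          simp only [List.length_take]
          omega
        have hb' : j < (((PySem.List.pyGetD matrix i [])).length : Int) := by
          omega
        unfold pvAget
        rw [PySem.List.pyGetD_eq_getElem _ _ hj0 ha', PySem.List.pyGetD_eq_getElem _ _ hj0 hb']
        exact List.getElem_take
      have hrowsB : ∀ i : Int, 0 ≤ i → i < n →
          PySem.List.pyGetD ((PySem.List.pyRange 0 n 1).map fun i =>
            PySem.List.slice (PySem.List.pyGetD matrix i []) none (some n)) i []
          = (PySem.List.pyGetD matrix i []).take n.toNat := by
        intro i h0 hi
        rw [PySem.List.pyGetD_map_pyRange_of_nonneg _ n i _ h0 hi,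
            PySem.List.slice_to _ hn0.le]
      simp only [isProjectivePlane, isProjectivePlane_alt, h1]
      rw [show q ^ 2 + q + 1 = n from by rw [hn]; ring]
      rw [← hn]
      set R := PySem.List.pyRange 0 n 1 with hR
      set rowsE := R.map fun i =>
        PySem.List.slice (PySem.List.pyGetD matrix i []) none (some n) with hrowsE
      set colsE := R.map (fun j => R.map fun i =>
        PySem.List.pyGetD (PySem.List.pyGetD rowsE i []) j 0) with hcolsE
      simp only [Bool.not_true, Bool.false_eq_true, if_false]
      have hmemR : ∀ x ∈ R, 0 ≤ x ∧ x < n := by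
        intro x hx
        exact PySem.List.mem_pyRange_one.mp hx
      have hcolj : ∀ j : Int, 0 ≤ j → j < n →
          (R.map fun i => PySem.List.pyGetD (PySem.List.pyGetD rowsE i []) j 0)
            = R.map fun i => pvAget matrix i j := by
        intro j hj0 hj
        apply List.map_congr_left
        intro i hi
        obtain ⟨hi0, hin⟩ := hmemR i hi
        rw [hrowsB i hi0 hin, hentry i j hi0 hin hj0 hj]
      have hgetR : ∀ (β : Type) (f : Int → β) (d : β) (i : Int), 0 ≤ i → i < n →
          PySem.List.pyGetD (R.map f) i d = f i := by
        intro β f d i h0 hi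
        rw [hR]
        exact PySem.List.pyGetD_map_pyRange_of_nonneg f n i d h0 hi
      have hmapR : ∀ (f : Int → Int), R.map f = (List.range n.toNat).map fun (k : Nat) => f (k : Int) := by
        intro f
        rw [hR, PySem.List.pyRange_one 0 n, List.map_map]
        have hnn : (n - 0).toNat = n.toNat := by simp
        rw [hnn]
        apply List.map_congr_left
        intro k _
        simp [Function.comp]
      have hlenR : R.length = n.toNat := by
        rw [hR]
        simp [PySem.List.length_pyRange_one]
      have hB2 : (colsE.all fun col => col.sum == q + 1)
          = (R.all fun j => (List.map (fun i => pvAget matrix i j) R).sum == q + 1) := by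
        rw [hcolsE, List.all_map]
        apply pvAllCongr
        intro j hj
        obtain ⟨hj0, hjn⟩ := hmemR j hj
        simp only [Function.comp_apply]
        rw [hcolj j hj0 hjn]
      have hF3 : ((pvCombs2 R).all fun p =>
            (List.map (fun pr => pr.2 * PySem.List.pyGetD (PySem.List.pyGetD rowsE p.2 []) pr.1 0)
                (PySem.List.pyGetD
                  (List.map (fun vec => List.filter (fun pr => pr.2 != 0) (PySem.List.enumerate vec)) rowsE) p.1
                  [])).sum == 1)
          = ((pvCombs2 R).all fun p =>
              (List.map (fun j => pvAget matrix p.1 j * pvAget matrix p.2 j) R).sum == 1) := by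
        apply pvAllCongr
        intro p hp
        obtain ⟨hpa, hpb⟩ := pvMem_combs2 hp
        obtain ⟨ha0, han⟩ := hmemR _ hpa
        obtain ⟨hb0, hbn⟩ := hmemR _ hpb
        have hsup : PySem.List.pyGetD
              (List.map (fun vec => List.filter (fun pr => pr.2 != 0) (PySem.List.enumerate vec)) rowsE) p.1 []
            = List.filter (fun pr => pr.2 != 0)
                (PySem.List.enumerate ((PySem.List.pyGetD matrix p.1 []).take n.toNat)) := by
          rw [hrowsE, List.map_map]
          rw [hgetR _ _ _ p.1 ha0 han]
          simp only [Function.comp_apply]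
          rw [PySem.List.slice_to _ hn0.le]
        rw [hsup, hrowsB p.2 hb0 hbn]
        rw [pvSupportDot _ _ 0]
        have hlu : ((PySem.List.pyGetD matrix p.1 []).take n.toNat).length = n.toNat := by
          have := hrowlen p.1 ha0 han
          simp [this]
        rw [hlu, hmapR]
        congr 1
        apply congrArg List.sum
        apply List.map_congr_left
        intro k hk
        have hkn : (k : Int) < n := by
          have := List.mem_range.mp hk
          omega
        have hk0 : (0 : Int) ≤ (k : Int) := Int.natCast_nonneg k
        rw [← PySem.List.pyGetD_natCast]
        rw [hentry p.1 ↑k ha0 han hk0 hkn]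
        rw [show (0 : Int) + ↑k = ↑k from zero_add _]
        rw [hentry p.2 ↑k hb0 hbn hk0 hkn]
      have hcolB : ∀ (j : Int), 0 ≤ j → j < n →
          PySem.List.pyGetD colsE j [] = R.map fun i => pvAget matrix i j := by
        intro j h0 hj
        rw [hcolsE, hgetR _ _ _ j h0 hj]
        exact hcolj j h0 hj
      have hF4 : ((pvCombs2 R).all fun p =>
            (List.map (fun pr => pr.2 * PySem.List.pyGetD (PySem.List.pyGetD colsE p.2 []) pr.1 0)
                (PySem.List.pyGetD
                  (List.map (fun vec => List.filter (fun pr => pr.2 != 0) (PySem.List.enumerate vec)) colsE) p.1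
                  [])).sum == 1)
          = ((pvCombs2 R).all fun p =>
              (List.map (fun i => pvAget matrix i p.1 * pvAget matrix i p.2) R).sum == 1) := by
        apply pvAllCongr
        intro p hp
        obtain ⟨hpa, hpb⟩ := pvMem_combs2 hp
        obtain ⟨ha0, han⟩ := hmemR _ hpa
        obtain ⟨hb0, hbn⟩ := hmemR _ hpb
        have hsupc : PySem.List.pyGetD
              (List.map (fun vec => List.filter (fun pr => pr.2 != 0) (PySem.List.enumerate vec)) colsE) p.1 []
            = List.filter (fun pr => pr.2 != 0)
                (PySem.List.enumerate (R.map fun i => pvAget matrix i p.1)) := by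
          rw [hcolsE, List.map_map, hgetR _ _ _ p.1 ha0 han]
          simp only [Function.comp_apply]
          rw [hcolj p.1 ha0 han]
        rw [hsupc, hcolB p.2 hb0 hbn]
        rw [pvSupportDot _ _ 0]
        have hlc : (R.map fun i => pvAget matrix i p.1).length = n.toNat := by
          simp [hlenR]
        rw [hlc]
        conv_rhs => rw [hmapR (fun i => pvAget matrix i p.1 * pvAget matrix i p.2)]
        congr 1
        apply congrArg List.sum
        apply List.map_congr_left
        intro k hk
        have hkn : (k : Int) < n := by
          have := List.mem_range.mp hk
          omega
        have hk0 : (0 : Int) ≤ (k : Int) := Int.natCast_nonneg k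
        rw [← PySem.List.pyGetD_natCast]
        rw [hgetR _ _ _ ↑k hk0 hkn]
        rw [show (0 : Int) + ↑k = ↑k from zero_add _]
        rw [hgetR _ _ _ ↑k hk0 hkn]
      simp only [List.all_cons, List.all_nil, Bool.and_true]
      rw [hB2, hF3, hF4]
      generalize ((pvCombs2 R).all fun p =>
        (List.map (fun i => pvAget matrix i p.1 * pvAget matrix i p.2) R).sum == 1) = b4
      generalize ((pvCombs2 R).all fun p =>
        (List.map (fun j => pvAget matrix p.1 j * pvAget matrix p.2 j) R).sum == 1) = b3
      generalize (R.all fun j => (List.map (fun i => pvAget matrix i j) R).sum == q + 1) = b2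
      cases b2 <;> cases b3 <;> cases b4 <;> simp
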